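-- pv_equiv track=rewrite | github.com/ssafy-cote/Noh_Wooyoung | 1주/모음 사전.py | solution
-- ===== SOURCE A (Python) =====
-- def solution(word):
--     word = list(word)
--     aeiou = ['A','E','I','O','U']
--     words = []
--     #길이 1 문자열
--     for a in range(5):
--         words.append(list(aeiou[a]))
--     #길이 2 문자열
--     for a in range(5):
--         for b in range(5):
--             words.append(list(aeiou[a] + aeiou[b]))
--     #길이 3 문자열
--     for a in range(5):
--         for b in range(5):
--             for c in range(5):
--                 words.append(list(aeiou[a] + aeiou[b] + aeiou[c]))
--     #길이 4 문자열
--     for a in range(5):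
--         for b in range(5):
--             for c in range(5):
--                 for d in range(5):
--                     words.append(list(aeiou[a] + aeiou[b] + aeiou[c] + aeiou[d]))
--     #길이 5 문자열
--     for a in range(5):
--         for b in range(5):
--             for c in range(5):
--                 for d in range(5):
--                     for e in range(5):
--                         words.append(list(aeiou[a] + aeiou[b] + aeiou[c] + aeiou[d] + aeiou[e]))
--
--     answer = 0
--     words.sort()
--
--     for i in range(len(words)):
--         if words[i] == word:
--             answer = i+1 #인덱스는 0부터니까 1 더한게 결과
--             break;
--
--     return answer
-- ===== SOURCE B (Python) =====
-- def solution(word):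
--     vowels = "AEIOU"
--     if not (1 <= len(word) <= 5) or any(c not in vowels for c in word):
--         return 0
--     rank = 0
--     for i, c in enumerate(word):
--         rank += 1 + vowels.index(c) * ((5 ** (5 - i) - 1) // 4)
--     return rank
-- ===== Notes on version B (the rewrite author's own statement) =====
-- stated objective: faster
-- what changed: A builds all 3905 vowel words of length 1..5 with five nested loop blocks, sorts them and linearly scans for the word; B computes the lexicographic rank directly with a closed-form positional formula (each char contributes 1 + index(c)*(5^(5-i)-1)/4) after an O(len) validity check, returning 0 for words not in the dictionary exactly as A does.
import Mathlib
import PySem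

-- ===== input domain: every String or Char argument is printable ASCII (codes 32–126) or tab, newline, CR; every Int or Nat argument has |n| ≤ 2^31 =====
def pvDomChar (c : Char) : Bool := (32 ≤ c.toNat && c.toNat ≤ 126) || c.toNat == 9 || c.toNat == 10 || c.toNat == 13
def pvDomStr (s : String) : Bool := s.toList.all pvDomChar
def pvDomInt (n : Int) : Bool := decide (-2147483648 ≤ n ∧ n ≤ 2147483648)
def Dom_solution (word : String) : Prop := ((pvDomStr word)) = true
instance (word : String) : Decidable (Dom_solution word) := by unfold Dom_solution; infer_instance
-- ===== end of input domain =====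

-- B replaces A's build-all-3905-words-sort-and-scan with a closed-form positional rank
-- (objective: faster — O(len) instead of building and sorting the whole dictionary).

-- ===== PORT A =====
-- the 'for i in range(len(words)): if words[i] == word: answer = i+1; break' loop
def solutionFind (ws : List (List Char)) (w : List Char) (i : Int) : Int :=
  match ws with
  | [] => 0
  | x :: t => if x = w then i + 1 else solutionFind t w (i + 1)

-- the five nested-loop blocks building `words` (independent of the input)
def solutionAeiou : List Char := ['A','E','I','O','U']
def solutionG (a : Int) : Char := PySem.List.pyGetD solutionAeiou a 'A'
def solutionWords : List (List Char) :=
  let words : List (List Char) := []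
  let words := (PySem.List.pyRange 0 5 1).foldl (fun ws a => ws ++ [[solutionG a]]) words
  let words := (PySem.List.pyRange 0 5 1).foldl (fun ws a =>
      (PySem.List.pyRange 0 5 1).foldl (fun ws b => ws ++ [[solutionG a, solutionG b]]) ws) words
  let words := (PySem.List.pyRange 0 5 1).foldl (fun ws a =>
      (PySem.List.pyRange 0 5 1).foldl (fun ws b =>
        (PySem.List.pyRange 0 5 1).foldl (fun ws c => ws ++ [[solutionG a, solutionG b, solutionG c]]) ws) ws) words
  let words := (PySem.List.pyRange 0 5 1).foldl (fun ws a =>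
      (PySem.List.pyRange 0 5 1).foldl (fun ws b =>
        (PySem.List.pyRange 0 5 1).foldl (fun ws c =>
          (PySem.List.pyRange 0 5 1).foldl (fun ws d => ws ++ [[solutionG a, solutionG b, solutionG c, solutionG d]]) ws) ws) ws) words
  let words := (PySem.List.pyRange 0 5 1).foldl (fun ws a =>
      (PySem.List.pyRange 0 5 1).foldl (fun ws b =>
        (PySem.List.pyRange 0 5 1).foldl (fun ws c =>
          (PySem.List.pyRange 0 5 1).foldl (fun ws d =>
            (PySem.List.pyRange 0 5 1).foldl (fun ws e => ws ++ [[solutionG a, solutionG b, solutionG c, solutionG d, solutionG e]]) ws) ws) ws) ws) words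
  words
def solution (word : String) : Int :=
  let w := word.toList
  let sortedWords := PySem.List.sorted solutionWords (fun x => x) false
  solutionFind sortedWords w 0

-- ===== PORT B =====
def solution_alt (word : String) : Int :=
  let cs := word.toList
  let vowels : List Char := "AEIOU".toList
  if (¬ (1 ≤ cs.length ∧ cs.length ≤ 5)) ∨ (∃ c ∈ cs, c ∉ vowels) then 0
  else
    (PySem.List.enumerate cs 0).foldl
      (fun rank p =>
        rank + 1 + ((PySem.List.index? vowels p.2).getD 0 : Int)
                     * PySem.Int.floordiv ((5 : Int) ^ (5 - p.1.toNat) - 1) 4)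
      0

-- ===== PRECONDITION & SPEC =====
def Spec_solution (word : String) (out : Int) : Prop := out = solution_alt word
instance (word : String) (out : Int) : Decidable (Spec_solution word out) := by unfold Spec_solution; infer_instance

-- ===== CLAIM (what is proved, stated in full; the proofs are below) =====
def Claim_equal_solution : Prop := ∀ (word : String), Dom_solution word → Spec_solution word (solution word)

-- ===== LEMMAS AND PROOFS =====

-- the vowels, all vowel words of length exactly k (lexicographic), and of length 1..d (A's build order)
def vws : List Char := ['A', 'E', 'I', 'O', 'U']

def listsOf : Nat → List (List Char)
  | 0 => [[]]
  | k + 1 => vws.flatMap (fun c => (listsOf k).map (c :: ·))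

def allWords : Nat → List (List Char)
  | 0 => []
  | d + 1 => allWords d ++ listsOf (d + 1)

-- geom d = 1 + 5 + … + 5^(d-1) = (5^d - 1)/4
def geom : Nat → Nat
  | 0 => 0
  | d + 1 => 1 + 5 * geom d

def vidx (c : Char) : Nat := vws.idxOf c

-- abstract positional rank with remaining depth d
def rnk : Nat → List Char → Nat
  | _, [] => 0
  | 0, _ :: _ => 0
  | d + 1, c :: w' => 1 + vidx c * geom (d + 1) + rnk d w'

theorem blk1 : vws.flatMap (fun a => [[a]]) = listsOf 1 := by decide
theorem blk2 : vws.flatMap (fun a => vws.flatMap (fun b => [[a, b]])) = listsOf 2 := by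
  show _ = vws.flatMap (fun a => (listsOf 1).map (a :: ·))
  refine List.flatMap_congr (fun a _ => ?_)
  rw [← blk1, List.map_flatMap]; simp
theorem blk3 : vws.flatMap (fun a => vws.flatMap (fun b => vws.flatMap (fun c => [[a, b, c]]))) = listsOf 3 := by
  show _ = vws.flatMap (fun a => (listsOf 2).map (a :: ·))
  refine List.flatMap_congr (fun a _ => ?_)
  rw [← blk2]; simp [List.map_flatMap]
theorem blk4 : vws.flatMap (fun a => vws.flatMap (fun b => vws.flatMap (fun c => vws.flatMap (fun d => [[a, b, c, d]])))) = listsOf 4 := by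
  show _ = vws.flatMap (fun a => (listsOf 3).map (a :: ·))
  refine List.flatMap_congr (fun a _ => ?_)
  rw [← blk3]; simp [List.map_flatMap]
theorem blk5 : vws.flatMap (fun a => vws.flatMap (fun b => vws.flatMap (fun c => vws.flatMap (fun d => vws.flatMap (fun e => [[a, b, c, d, e]]))))) = listsOf 5 := by
  show _ = vws.flatMap (fun a => (listsOf 4).map (a :: ·))
  refine List.flatMap_congr (fun a _ => ?_)
  rw [← blk4]; simp [List.map_flatMap]

theorem hgmap : (PySem.List.pyRange 0 5 1).map solutionG = vws := by decide

theorem conv_flatMap (F : Int → List (List Char)) (H : Char → List (List Char))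
    (h : ∀ a ∈ PySem.List.pyRange 0 5 1, F a = H (solutionG a)) :
    (PySem.List.pyRange 0 5 1).flatMap F = vws.flatMap H := by
  rw [List.flatMap_congr h, ← hgmap, List.flatMap_map]

theorem iblk1 : (PySem.List.pyRange 0 5 1).flatMap (fun a => [[solutionG a]]) = listsOf 1 := by
  rw [conv_flatMap _ (fun a => [[a]]) (fun _ _ => rfl)]; exact blk1

theorem iblk2 : (PySem.List.pyRange 0 5 1).flatMap (fun a => (PySem.List.pyRange 0 5 1).flatMap (fun b => [[solutionG a, solutionG b]])) = listsOf 2 := by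
  rw [conv_flatMap _ (fun a => (PySem.List.pyRange 0 5 1).flatMap (fun b => [[a, solutionG b]])) (fun _ _ => rfl)]
  rw [List.flatMap_congr (fun a _ => conv_flatMap _ (fun b => [[a, b]]) (fun _ _ => rfl))]
  exact blk2

theorem iblk3 : (PySem.List.pyRange 0 5 1).flatMap (fun a => (PySem.List.pyRange 0 5 1).flatMap (fun b => (PySem.List.pyRange 0 5 1).flatMap (fun c => [[solutionG a, solutionG b, solutionG c]]))) = listsOf 3 := by
  rw [conv_flatMap _ (fun a => (PySem.List.pyRange 0 5 1).flatMap (fun b => (PySem.List.pyRange 0 5 1).flatMap (fun c => [[a, solutionG b, solutionG c]]))) (fun _ _ => rfl)]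
  rw [List.flatMap_congr (fun a _ => conv_flatMap _ (fun b => (PySem.List.pyRange 0 5 1).flatMap (fun c => [[a, b, solutionG c]])) (fun _ _ => rfl))]
  rw [List.flatMap_congr (fun a _ => List.flatMap_congr (fun b _ => conv_flatMap _ (fun c => [[a, b, c]]) (fun _ _ => rfl)))]
  exact blk3

theorem iblk4 : (PySem.List.pyRange 0 5 1).flatMap (fun a => (PySem.List.pyRange 0 5 1).flatMap (fun b => (PySem.List.pyRange 0 5 1).flatMap (fun c => (PySem.List.pyRange 0 5 1).flatMap (fun d => [[solutionG a, solutionG b, solutionG c, solutionG d]])))) = listsOf 4 := by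
  rw [conv_flatMap _ (fun a => (PySem.List.pyRange 0 5 1).flatMap (fun b => (PySem.List.pyRange 0 5 1).flatMap (fun c => (PySem.List.pyRange 0 5 1).flatMap (fun d => [[a, solutionG b, solutionG c, solutionG d]])))) (fun _ _ => rfl)]
  rw [List.flatMap_congr (fun a _ => conv_flatMap _ (fun b => (PySem.List.pyRange 0 5 1).flatMap (fun c => (PySem.List.pyRange 0 5 1).flatMap (fun d => [[a, b, solutionG c, solutionG d]]))) (fun _ _ => rfl))]
  rw [List.flatMap_congr (fun a _ => List.flatMap_congr (fun b _ => conv_flatMap _ (fun c => (PySem.List.pyRange 0 5 1).flatMap (fun d => [[a, b, c, solutionG d]])) (fun _ _ => rfl)))]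
  rw [List.flatMap_congr (fun a _ => List.flatMap_congr (fun b _ => List.flatMap_congr (fun c _ => conv_flatMap _ (fun d => [[a, b, c, d]]) (fun _ _ => rfl))))]
  exact blk4

theorem iblk5 : (PySem.List.pyRange 0 5 1).flatMap (fun a => (PySem.List.pyRange 0 5 1).flatMap (fun b => (PySem.List.pyRange 0 5 1).flatMap (fun c => (PySem.List.pyRange 0 5 1).flatMap (fun d => (PySem.List.pyRange 0 5 1).flatMap (fun e => [[solutionG a, solutionG b, solutionG c, solutionG d, solutionG e]]))))) = listsOf 5 := by
  rw [conv_flatMap _ (fun a => (PySem.List.pyRange 0 5 1).flatMap (fun b => (PySem.List.pyRange 0 5 1).flatMap (fun c => (PySem.List.pyRange 0 5 1).flatMap (fun d => (PySem.List.pyRange 0 5 1).flatMap (fun e => [[a, solutionG b, solutionG c, solutionG d, solutionG e]]))))) (fun _ _ => rfl)]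
  rw [List.flatMap_congr (fun a _ => conv_flatMap _ (fun b => (PySem.List.pyRange 0 5 1).flatMap (fun c => (PySem.List.pyRange 0 5 1).flatMap (fun d => (PySem.List.pyRange 0 5 1).flatMap (fun e => [[a, b, solutionG c, solutionG d, solutionG e]])))) (fun _ _ => rfl))]
  rw [List.flatMap_congr (fun a _ => List.flatMap_congr (fun b _ => conv_flatMap _ (fun c => (PySem.List.pyRange 0 5 1).flatMap (fun d => (PySem.List.pyRange 0 5 1).flatMap (fun e => [[a, b, c, solutionG d, solutionG e]]))) (fun _ _ => rfl)))]
  rw [List.flatMap_congr (fun a _ => List.flatMap_congr (fun b _ => List.flatMap_congr (fun c _ => conv_flatMap _ (fun d => (PySem.List.pyRange 0 5 1).flatMap (fun e => [[a, b, c, d, solutionG e]])) (fun _ _ => rfl))))]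
  rw [List.flatMap_congr (fun a _ => List.flatMap_congr (fun b _ => List.flatMap_congr (fun c _ => List.flatMap_congr (fun d _ => conv_flatMap _ (fun e => [[a, b, c, d, e]]) (fun _ _ => rfl)))))]
  exact blk5

theorem solutionWords_eq : solutionWords = allWords 5 := by
  unfold solutionWords
  simp only [PySem.List.foldl_append_eq_flatMap, List.nil_append]
  rw [iblk1, iblk2, iblk3, iblk4, iblk5]
  simp [allWords, List.append_assoc]

theorem find_spec (ws : List (List Char)) (w : List Char) (i : Int) :
    solutionFind ws w i =
      match PySem.List.index? ws w with
      | some k => i + k + 1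
      | none => 0 := by
  induction ws generalizing i with
  | nil => simp [solutionFind, PySem.List.index?]
  | cons x t ih =>
    by_cases h : x = w
    · subst h
      rw [PySem.List.index?_cons_self]
      simp [solutionFind]
    · rw [PySem.List.index?_cons_of_ne _ h]
      simp only [solutionFind, if_neg h, ih]
      cases PySem.List.index? t w with
      | none => simp
      | some k => simp; ring

theorem sorted_irrel {α κ : Type} (lt : LT κ) (d1 d2 : @DecidableLT κ lt) (xs : List α)
    (key : α → κ) (rev : Bool) :
    @PySem.List.sorted α κ lt d1 xs key rev = @PySem.List.sorted α κ lt d2 xs key rev := by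
  have h : d1 = d2 := by funext a b; exact Subsingleton.elim _ _
  rw [h]

theorem index?_of_pairwise_le (xs : List (List Char)) (w : List Char)
    (hp : xs.Pairwise (fun a b => ¬ b < a)) (hm : w ∈ xs) :
    PySem.List.index? xs w = some (xs.countP (fun u => decide (u < w))) := by
  induction xs with
  | nil => cases hm
  | cons x t ih =>
    rcases List.pairwise_cons.1 hp with ⟨hx, ht⟩
    by_cases h : x = w
    · subst h
      rw [PySem.List.index?_cons_self]
      have h0 : t.countP (fun u => decide (u < x)) = 0 := by
        apply List.countP_eq_zero.2
        intro u hu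
        simp only [decide_eq_true_eq]
        exact hx u hu
      simp [h0]
    · have hmt : w ∈ t := by cases hm with | head => exact absurd rfl h | tail _ h' => exact h'
      rw [PySem.List.index?_cons_of_ne _ h, ih ht hmt]
      have hxw : x < w := by
        rcases lt_trichotomy x w with h1 | h1 | h1
        · exact h1
        · exact absurd h1 h
        · exact absurd h1 (hx w hmt)
      simp [hxw]
theorem length_listsOf (k : Nat) : (listsOf k).length = 5 ^ k := by
  induction k with
  | zero => rfl
  | succ k ih => simp [listsOf, vws, ih]; ring

theorem mem_listsOf (k : Nat) (w : List Char) :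
    w ∈ listsOf k ↔ w.length = k ∧ ∀ c ∈ w, c ∈ vws := by
  induction k generalizing w with
  | zero =>
    simp only [listsOf, List.mem_singleton]
    constructor
    · rintro rfl; simp
    · rintro ⟨h, _⟩; exact List.eq_nil_of_length_eq_zero h
  | succ k ih =>
    simp only [listsOf, List.mem_flatMap, List.mem_map]
    constructor
    · rintro ⟨c, hc, u, hu, rfl⟩
      rcases (ih u).1 hu with ⟨hl, hv⟩
      refine ⟨by simp [hl], ?_⟩
      intro x hx
      rcases List.mem_cons.1 hx with rfl | hx
      · exact hc
      · exact hv x hx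
    · rintro ⟨hl, hv⟩
      cases w with
      | nil => simp at hl
      | cons c u =>
        refine ⟨c, hv c (by simp), u, (ih u).2 ⟨by simpa using hl, fun x hx => hv x (by simp [hx])⟩, rfl⟩

theorem mem_allWords (d : Nat) (w : List Char) :
    w ∈ allWords d ↔ (1 ≤ w.length ∧ w.length ≤ d) ∧ ∀ c ∈ w, c ∈ vws := by
  induction d with
  | zero =>
    rw [show allWords 0 = ([] : List (List Char)) from rfl]
    simp only [List.not_mem_nil, false_iff]
    rintro ⟨⟨h1, h2⟩, -⟩
    omega
  | succ d ih =>
    simp only [allWords, List.mem_append, ih, mem_listsOf]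
    constructor
    · rintro (⟨⟨h1, h2⟩, hv⟩ | ⟨hl, hv⟩)
      · exact ⟨⟨h1, by omega⟩, hv⟩
      · exact ⟨⟨by omega, by omega⟩, hv⟩
    · rintro ⟨⟨h1, h2⟩, hv⟩
      by_cases h : w.length = d + 1
      · exact Or.inr ⟨h, hv⟩
      · exact Or.inl ⟨⟨h1, by omega⟩, hv⟩

-- block counts inside one level
theorem block_lt (k : Nat) (c' c : Char) (w' : List Char) (h : c' < c) :
    (listsOf k).countP (fun u => decide (c' :: u < c :: w')) = 5 ^ k := by
  rw [← length_listsOf k]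
  apply List.countP_eq_length.2
  intro u _
  simp [List.cons_lt_cons_iff, h]


theorem block_eq (k : Nat) (c : Char) (w' : List Char) :
    (listsOf k).countP (fun u => decide (c :: u < c :: w')) =
      (listsOf k).countP (fun u => decide (u < w')) := by
  apply List.countP_congr
  intro u _
  simp

theorem block_gt (k : Nat) (c' c : Char) (w' : List Char) (h : c < c') :
    (listsOf k).countP (fun u => decide (c' :: u < c :: w')) = 0 := by
  apply List.countP_eq_zero.2
  intro u _
  simp only [decide_eq_true_eq, List.cons_lt_cons_iff, not_or, not_and]
  exact ⟨not_lt.2 h.le, fun e => absurd e.symm (ne_of_lt h)⟩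

theorem cntN_succ (k : Nat) (c : Char) (w' : List Char) (hc : c ∈ vws) :
    (listsOf (k + 1)).countP (fun u => decide (u < c :: w')) =
      vidx c * 5 ^ k + (listsOf k).countP (fun u => decide (u < w')) := by
  have expand : (listsOf (k + 1)).countP (fun u => decide (u < c :: w')) =
      (listsOf k).countP (fun u => decide ('A' :: u < c :: w')) +
      ((listsOf k).countP (fun u => decide ('E' :: u < c :: w')) +
      ((listsOf k).countP (fun u => decide ('I' :: u < c :: w')) +
      ((listsOf k).countP (fun u => decide ('O' :: u < c :: w')) +
      (listsOf k).countP (fun u => decide ('U' :: u < c :: w'))))) := by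
    simp [listsOf, vws, List.countP_append, List.countP_map, Function.comp_def]
  rw [expand]
  fin_cases hc
  · rw [block_eq, block_gt k 'E' 'A' w' (by decide), block_gt k 'I' 'A' w' (by decide),
      block_gt k 'O' 'A' w' (by decide), block_gt k 'U' 'A' w' (by decide),
      show vidx 'A' = 0 from by decide]
    try simp
    try ring
  · rw [block_lt k 'A' 'E' w' (by decide), block_eq, block_gt k 'I' 'E' w' (by decide),
      block_gt k 'O' 'E' w' (by decide), block_gt k 'U' 'E' w' (by decide),
      show vidx 'E' = 1 from by decide]
    try simp
    try ring
  · rw [block_lt k 'A' 'I' w' (by decide), block_lt k 'E' 'I' w' (by decide), block_eq,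
      block_gt k 'O' 'I' w' (by decide), block_gt k 'U' 'I' w' (by decide),
      show vidx 'I' = 2 from by decide]
    try simp
    try ring
  · rw [block_lt k 'A' 'O' w' (by decide), block_lt k 'E' 'O' w' (by decide),
      block_lt k 'I' 'O' w' (by decide), block_eq, block_gt k 'U' 'O' w' (by decide),
      show vidx 'O' = 3 from by decide]
    try simp
    try ring
  · rw [block_lt k 'A' 'U' w' (by decide), block_lt k 'E' 'U' w' (by decide),
      block_lt k 'I' 'U' w' (by decide), block_lt k 'O' 'U' w' (by decide), block_eq,
      show vidx 'U' = 4 from by decide]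
    try simp
    try ring

theorem cnt_cons (d : Nat) (c : Char) (w' : List Char) (hc : c ∈ vws) :
    (allWords (d + 1)).countP (fun u => decide (u < c :: w')) =
      vidx c * geom (d + 1) +
      (if w' = [] then 0 else 1) +
      (allWords d).countP (fun u => decide (u < w')) := by
  induction d with
  | zero =>
    have h1 : (listsOf 0).countP (fun u => decide (u < w')) = if w' = [] then 0 else 1 := by
      cases w' with
      | nil => simp [listsOf, List.not_lt_nil]
      | cons a t => simp [listsOf, List.nil_lt_cons]
    simp [allWords, cntN_succ 0 c w' hc, geom, h1]
  | succ d ih =>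
    have step : (allWords (d + 2)).countP (fun u => decide (u < c :: w')) =
        (allWords (d + 1)).countP (fun u => decide (u < c :: w')) +
        (listsOf (d + 2)).countP (fun u => decide (u < c :: w')) := by
      rw [show allWords (d + 2) = allWords (d + 1) ++ listsOf (d + 2) from rfl, List.countP_append]
    have step' : (allWords (d + 1)).countP (fun u => decide (u < w')) =
        (allWords d).countP (fun u => decide (u < w')) +
        (listsOf (d + 1)).countP (fun u => decide (u < w')) := by
      rw [show allWords (d + 1) = allWords d ++ listsOf (d + 1) from rfl, List.countP_append]
    rw [step, ih, cntN_succ (d + 1) c w' hc, step']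
    have hg : geom (d + 2) = geom (d + 1) + 5 ^ (d + 1) := by
      have : ∀ m, 5 ^ m = 4 * geom m + 1 := by
        intro m
        induction m with
        | zero => rfl
        | succ m ihm => simp [geom, pow_succ, ihm]; ring
      simp [geom, this (d + 1)]; ring
    rw [hg]; ring

theorem rank_main (w : List Char) : ∀ d : Nat, w ≠ [] → w.length ≤ d → (∀ c ∈ w, c ∈ vws) →
    (allWords d).countP (fun u => decide (u < w)) + 1 = rnk d w := by
  induction w with
  | nil => intro d h; exact absurd rfl h
  | cons c w' ih =>
    intro d _ hlen hv
    cases d with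
    | zero => simp at hlen
    | succ d =>
      rw [cnt_cons d c w' (hv c (by simp))]
      by_cases h' : w' = []
      · subst h'
        simp [rnk]
        ring
      · have := ih d h' (by simpa using Nat.lt_succ_iff.1 (by simpa using hlen)) (fun x hx => hv x (by simp [hx]))
        simp only [rnk, if_neg h']
        omega

-- geom is what B's (5^(5-i)-1)//4 computes
theorem floordiv_geom (d : Nat) : PySem.Int.floordiv ((5 : Int) ^ d - 1) 4 = (geom d : Int) := by
  have h : (5 : Int) ^ d = 4 * (geom d : Int) + 1 := by
    have hn : (5 : Nat) ^ d = 4 * geom d + 1 := by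
      induction d with
      | zero => rfl
      | succ d ih => simp [geom, pow_succ, ih]; ring
    exact_mod_cast hn
  rw [show ((5 : Int) ^ d - 1) = ((4 * geom d : Nat) : Int) by rw [h]; push_cast; ring]
  rw [show (4 : Int) = ((4 : Nat) : Int) by norm_num, PySem.Int.floordiv_natCast]
  simp
theorem index?_getD_vidx (c : Char) (hc : c ∈ vws) :
    ((PySem.List.index? vws c).getD 0 : Int) = (vidx c : Int) := by
  fin_cases hc <;> decide

theorem alt_fold (cs : List Char) : ∀ (s : Nat) (r0 : Int), (∀ c ∈ cs, c ∈ vws) → s + cs.length ≤ 5 →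
    (PySem.List.enumerate cs (s : Int)).foldl
      (fun rank p =>
        rank + 1 + ((PySem.List.index? vws p.2).getD 0 : Int)
                     * PySem.Int.floordiv ((5 : Int) ^ (5 - p.1.toNat) - 1) 4)
      r0 = r0 + rnk (5 - s) cs := by
  induction cs with
  | nil => intro s r0 _ _; simp [PySem.List.enumerate_nil, rnk]
  | cons c t ih =>
    intro s r0 hv hlen
    rw [PySem.List.enumerate_cons, List.foldl_cons]
    have hs : ((s : Int) + 1) = (((s + 1 : Nat) : Int)) := by push_cast; ring
    rw [hs, ih (s + 1) _ (fun x hx => hv x (by simp [hx])) (by simp at hlen; omega)]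
    have htoNat : ((s : Int)).toNat = s := Int.toNat_natCast s
    rw [htoNat, index?_getD_vidx c (hv c (by simp)), floordiv_geom (5 - s)]
    have hd : ∃ e, 5 - s = e + 1 := ⟨4 - s, by simp at hlen; omega⟩
    rcases hd with ⟨e, he⟩
    rw [he, show 5 - (s + 1) = e by omega]
    simp [rnk]
    ring

-- ===== VERDICT (by name: the statement is the Claim_ definition above) =====
theorem solution_spec : Claim_equal_solution := by
  intro word _
  unfold Spec_solution solution solution_alt
  simp only [solutionWords_eq]
  set cs := word.toList with hcs
  have hvv : "AEIOU".toList = vws := by decide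
  rw [hvv, find_spec]
  by_cases hval : (1 ≤ cs.length ∧ cs.length ≤ 5) ∧ ∀ c ∈ cs, c ∈ vws
  · have hmem : cs ∈ allWords 5 := (mem_allWords 5 cs).2 hval
    have hmem' : cs ∈ PySem.List.sorted (allWords 5) (fun x => x) false :=
      (PySem.List.mem_sorted _ _ _ _).2 hmem
    have hpw : (PySem.List.sorted (allWords 5) (fun x => x) false).Pairwise (fun a b => ¬ b < a) := by
      have h := (PySem.List.sorted_pairwise (allWords 5) (fun x => x)).imp
        (fun {a b} (hab : a ≤ b) => not_lt.2 hab)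
      rw [sorted_irrel _ _ (fun a b => List.decidableLT a b) (allWords 5) (fun x => x) false] at h
      exact h
    rw [index?_of_pairwise_le _ _ hpw hmem']
    have hcnt : (PySem.List.sorted (allWords 5) (fun x => x) false).countP
        (fun u => decide (u < cs)) = (allWords 5).countP (fun u => decide (u < cs)) :=
      (PySem.List.sorted_perm (allWords 5) (fun x => x) false).countP_eq _
    have hne : cs ≠ [] := by
      intro h; rw [h] at hval; simp at hval
    have hrank := rank_main cs 5 hne hval.1.2 hval.2
    have hguard : ¬ ((¬ (1 ≤ cs.length ∧ cs.length ≤ 5)) ∨ (∃ c ∈ cs, c ∉ vws)) := by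
      push_neg
      exact ⟨hval.1, hval.2⟩
    rw [if_neg hguard]
    have halt := alt_fold cs 0 0 hval.2 (by omega)
    rw [show ((0 : Nat) : Int) = (0 : Int) from rfl, show 5 - (0 : Nat) = 5 from rfl] at halt
    rw [halt]
    simp [hcnt]
    rw [← hrank]
    push_cast
    ring
  · have hnm : cs ∉ allWords 5 := fun h => hval (by
      rcases (mem_allWords 5 cs).1 h with ⟨h1, h2⟩; exact ⟨h1, h2⟩)
    have hnm' : cs ∉ PySem.List.sorted (allWords 5) (fun x => x) false :=
      fun h => hnm ((PySem.List.mem_sorted _ _ _ _).1 h)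
    rw [(PySem.List.index?_eq_none_iff _ _).2 hnm']
    have hguard : (¬ (1 ≤ cs.length ∧ cs.length ≤ 5)) ∨ (∃ c ∈ cs, c ∉ vws) := by
      by_contra h
      push_neg at h
      exact hval ⟨h.1, h.2⟩
    rw [if_pos hguard]
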